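-- pv_equiv track=rewrite | github.com/gcoiro/SpringConfigRecon | backend/app/config_fetcher.py | flatten_actuator_properties
-- ===== SOURCE A (Python) =====
-- from typing import Dict, List
--
-- def flatten_actuator_properties(env_payload: Dict) -> Dict[str, str]:
--     """Flatten the Spring Boot environment payload into a single property dictionary."""
--
--     properties: Dict[str, str] = {}
--     sources = env_payload.get("propertySources") or []
--
--     for source in sources:
--         source_properties = source.get("properties") or {}
--         for key, detail in source_properties.items():
--             if key not in properties:  # Preserve first occurrence (highest priority)
--                 properties[key] = detail.get("value") if isinstance(detail, dict) else detail
--     return properties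
-- ===== SOURCE B (Python) =====
-- def flatten_actuator_properties(env_payload):
--     """Flatten the Spring Boot environment payload into a single property dictionary."""
--
--     merged = {}
--     for source in reversed(env_payload.get("propertySources") or []):
--         flat_source = {
--             key: (detail.get("value") if isinstance(detail, dict) else detail)
--             for key, detail in (source.get("properties") or {}).items()
--         }
--         merged = flat_source | {k: v for k, v in merged.items() if k not in flat_source}
--     return merged
-- ===== Notes on version B (the rewrite author's own statement) =====
-- stated objective: alternative
-- what changed: B traverses the property sources in reverse, flattens each source into its own dict once, and merges by dict-union with a filtered comprehension, instead of A's forward scan guarded by a per-key membership test on the growing accumulator; Pre_ excludes association lists in which a 'properties' dict repeats a key, a representation artifact that corresponds to no real Python dict.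
import Mathlib
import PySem

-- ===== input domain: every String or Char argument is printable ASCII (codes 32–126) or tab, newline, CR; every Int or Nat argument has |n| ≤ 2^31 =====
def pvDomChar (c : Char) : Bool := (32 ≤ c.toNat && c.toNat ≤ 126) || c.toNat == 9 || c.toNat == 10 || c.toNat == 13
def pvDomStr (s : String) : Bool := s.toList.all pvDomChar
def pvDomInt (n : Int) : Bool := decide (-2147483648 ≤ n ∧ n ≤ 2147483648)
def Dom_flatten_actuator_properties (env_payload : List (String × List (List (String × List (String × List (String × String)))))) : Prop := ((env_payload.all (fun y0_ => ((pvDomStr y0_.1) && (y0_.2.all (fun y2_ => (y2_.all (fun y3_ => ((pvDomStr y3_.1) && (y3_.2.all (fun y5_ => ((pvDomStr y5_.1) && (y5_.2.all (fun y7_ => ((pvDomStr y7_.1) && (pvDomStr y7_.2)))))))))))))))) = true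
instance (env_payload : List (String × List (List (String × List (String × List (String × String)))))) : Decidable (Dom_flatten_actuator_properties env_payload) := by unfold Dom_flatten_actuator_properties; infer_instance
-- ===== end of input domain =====

-- B flattens the sources in REVERSE order, building each source's dict once and
-- taking a filtered dict union, instead of A's forward scan with a per-key
-- membership guard on the growing accumulator (objective: alternative, same cost).

-- ===== PORT A =====
-- detail is a dict on this typed domain, so A's `isinstance(detail, dict)` branch is the one taken
def pvAVal (detail : List (String × String)) : Option String :=
  (PySem.Dict.mk detail).get? "value"

-- source.get("properties") or {}  (empty dict and missing key both give {})
def pvAProps (source : List (String × List (String × List (String × String)))) :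
    List (String × List (String × String)) :=
  ((PySem.Dict.mk source).get? "properties").getD []

-- the body of A's outer loop: one source folded into `properties` with the guard
def pvAStep (properties : PySem.Dict String (Option String))
    (source : List (String × List (String × List (String × String)))) :
    PySem.Dict String (Option String) :=
  (pvAProps source).foldl
    (fun properties kv =>
      if properties.contains kv.1 then properties
      else properties.insert kv.1 (pvAVal kv.2))
    properties

def flatten_actuator_properties (env_payload : List (String × List (List (String × List (String × List (String × String)))))) : List (String × Option String) :=
  let sources := ((PySem.Dict.mk env_payload).get? "propertySources").getD []
  (sources.foldl pvAStep PySem.Dict.empty).items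

-- ===== PORT B =====
def pvBVal (detail : List (String × String)) : Option String :=
  (PySem.Dict.mk detail).get? "value"

-- the per-source dict comprehension of B
def pvBFlatSource (source : List (String × List (String × List (String × String)))) :
    PySem.Dict String (Option String) :=
  (((PySem.Dict.mk source).get? "properties").getD []).foldl
    (fun d kv => d.insert kv.1 (pvBVal kv.2)) PySem.Dict.empty

-- B's reversed loop: `for source in reversed(sources)` with
-- `merged = flat_source | {k: v for k, v in merged.items() if k not in flat_source}`
def pvBMerge (sources : List (List (String × List (String × List (String × String))))) :
    PySem.Dict String (Option String) :=
  sources.foldr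
    (fun source merged =>
      let flat_source := pvBFlatSource source
      (merged.items.filter (fun kv => !flat_source.contains kv.1)).foldl
        (fun acc kv => acc.insert kv.1 kv.2) flat_source)
    PySem.Dict.empty

def flatten_actuator_properties_alt (env_payload : List (String × List (List (String × List (String × List (String × String)))))) : List (String × Option String) :=
  (pvBMerge (((PySem.Dict.mk env_payload).get? "propertySources").getD [])).items

-- ===== PRECONDITION & SPEC =====
-- Pre_ excludes association lists in which some "properties" dict carries a duplicate
-- key: such a list corresponds to no real Python dict (dict.items() never repeats a
-- key), and on it A's first-value and B's last-value readings are both accidental.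
def Pre_flatten_actuator_properties (env_payload : List (String × List (List (String × List (String × List (String × String)))))) : Prop :=
  ∀ p ∈ env_payload, ∀ source ∈ p.2, ∀ q ∈ source, (q.2.map Prod.fst).Nodup
instance (env_payload : List (String × List (List (String × List (String × List (String × String)))))) : Decidable (Pre_flatten_actuator_properties env_payload) := by unfold Pre_flatten_actuator_properties; infer_instance

def pvWitness_flatten_actuator_properties : (List (String × List (List (String × List (String × List (String × String)))))) :=
  [("propertySources", [[("properties", [("a", [("value", "1")]), ("b", [("value", "2")])])],
                        [("properties", [("a", [("value", "3")])])]])]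

def Spec_flatten_actuator_properties (env_payload : List (String × List (List (String × List (String × List (String × String)))))) (out : List (String × Option String)) : Prop := out = flatten_actuator_properties_alt env_payload
instance (env_payload : List (String × List (List (String × List (String × List (String × String)))))) (out : List (String × Option String)) : Decidable (Spec_flatten_actuator_properties env_payload out) := by unfold Spec_flatten_actuator_properties; infer_instance

-- ===== CLAIM (what is proved, stated in full; the proofs are below) =====
def Claim_equal_flatten_actuator_properties : Prop := ∀ (env_payload : List (String × List (List (String × List (String × List (String × String)))))), Dom_flatten_actuator_properties env_payload → Pre_flatten_actuator_properties env_payload → Spec_flatten_actuator_properties env_payload (flatten_actuator_properties env_payload)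

-- ===== LEMMAS AND PROOFS =====

abbrev PvSource := List (String × List (String × List (String × String)))
abbrev PvOut := PySem.Dict String (Option String)

-- one item of the flattened pair list
def pvF (kv : String × List (String × String)) : String × Option String := (kv.1, pvAVal kv.2)

theorem pvBFlatSource_items (s : PvSource) (h : ((pvAProps s).map Prod.fst).Nodup) :
    (pvBFlatSource s).items = (pvAProps s).map pvF := by
  have := PySem.Dict.items_foldl_insert_fresh (l := pvAProps s) (k := Prod.fst)
      (v := fun kv => pvBVal kv.2) (d := (PySem.Dict.empty : PvOut))
      (by intro a _; simp [PySem.Dict.contains_empty]) h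
  simpa [pvBFlatSource, pvAProps, pvF, pvAVal, pvBVal, PySem.Dict.empty] using this

theorem pvBFlatSource_keys (s : PvSource) (h : ((pvAProps s).map Prod.fst).Nodup) :
    (pvBFlatSource s).keys = (pvAProps s).map Prod.fst := by
  simp only [PySem.Dict.keys, pvBFlatSource_items s h]
  simp [pvF]

-- A's inner loop over one source, from an arbitrary accumulator
theorem pvAInner_items (l : List (String × List (String × String)))
    (hl : (l.map Prod.fst).Nodup) (d : PvOut) (hnd : d.keys.Nodup) :
    (l.foldl (fun d kv => if d.contains kv.1 then d else d.insert kv.1 (pvAVal kv.2)) d).items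
      = d.items ++ (l.filter (fun kv => !d.contains kv.1)).map pvF := by
  induction l generalizing d with
  | nil => simp
  | cons kv rest ih =>
    simp only [List.map_cons, List.nodup_cons] at hl
    by_cases hc : d.contains kv.1
    · simpa [hc] using ih hl.2 d hnd
    · have hins : (d.insert kv.1 (pvAVal kv.2)).keys.Nodup :=
        PySem.Dict.nodup_keys_insert _ _ _ hnd
      have hrest := ih hl.2 (d.insert kv.1 (pvAVal kv.2)) hins
      have hfil : rest.filter (fun x => !(d.insert kv.1 (pvAVal kv.2)).contains x.1)
          = rest.filter (fun x => !d.contains x.1) := by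
        apply List.filter_congr
        intro x hx
        have hne : x.1 ≠ kv.1 := by
          intro he; exact hl.1 (he ▸ List.mem_map_of_mem hx)
        simp [PySem.Dict.contains_insert, hne]
      have hitems : (d.insert kv.1 (pvAVal kv.2)).items = d.items ++ [(kv.1, pvAVal kv.2)] :=
        PySem.Dict.items_insert_of_not_contains d _ (by simpa using hc)
      simp [hc, hrest, hfil, hitems, pvF]

theorem pvAStep_items (d : PvOut) (s : PvSource) (hnd : d.keys.Nodup)
    (h : ((pvAProps s).map Prod.fst).Nodup) :
    (pvAStep d s).items = d.items ++ ((pvAProps s).filter (fun kv => !d.contains kv.1)).map pvF :=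
  pvAInner_items (pvAProps s) h d hnd

theorem pvAStep_keys (d : PvOut) (s : PvSource) (hnd : d.keys.Nodup)
    (h : ((pvAProps s).map Prod.fst).Nodup) :
    (pvAStep d s).keys = d.keys ++ ((pvAProps s).filter (fun kv => !d.contains kv.1)).map Prod.fst := by
  simp only [PySem.Dict.keys, pvAStep_items d s hnd h]
  simp [pvF]

theorem pvAStep_keys_nodup (d : PvOut) (s : PvSource) (hnd : d.keys.Nodup)
    (h : ((pvAProps s).map Prod.fst).Nodup) : (pvAStep d s).keys.Nodup := by
  rw [pvAStep_keys d s hnd h]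
  rw [List.nodup_append]
  refine ⟨hnd, ?_, ?_⟩
  · exact h.sublist (List.Sublist.map _ List.filter_sublist)
  · intro a ha b hb hab
    subst hab
    obtain ⟨kv, hkv, rfl⟩ := List.mem_map.1 hb
    have := (List.mem_filter.1 hkv).2
    rw [← PySem.Dict.contains_iff_mem_keys] at ha
    simp [ha] at this

theorem pvAStep_contains (d : PvOut) (s : PvSource) (hnd : d.keys.Nodup)
    (h : ((pvAProps s).map Prod.fst).Nodup) (k : String) :
    (pvAStep d s).contains k = (d.contains k || decide (k ∈ (pvAProps s).map Prod.fst)) := by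
  by_cases hc : (pvAStep d s).contains k
  · rw [hc]
    rw [PySem.Dict.contains_iff_mem_keys, pvAStep_keys d s hnd h, List.mem_append] at hc
    rcases hc with hc | hc
    · rw [← PySem.Dict.contains_iff_mem_keys] at hc; simp [hc]
    · obtain ⟨kv, hkv, rfl⟩ := List.mem_map.1 hc
      have : kv.1 ∈ (pvAProps s).map Prod.fst :=
        List.mem_map_of_mem (List.mem_filter.1 hkv).1
      simp [this]
  · rw [Bool.not_eq_true] at hc
    rw [hc]
    have hc' : ¬ (k ∈ d.keys ∨ k ∈ ((pvAProps s).filter (fun kv => !d.contains kv.1)).map Prod.fst) := by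
      rw [← List.mem_append, ← pvAStep_keys d s hnd h, ← PySem.Dict.contains_iff_mem_keys]
      simp [hc]
    rw [not_or] at hc'
    have h1 : d.contains k = false := by
      rw [← Bool.not_eq_true, PySem.Dict.contains_iff_mem_keys]; exact hc'.1
    have h2 : k ∉ (pvAProps s).map Prod.fst := by
      intro hm
      obtain ⟨kv, hkv, he⟩ := List.mem_map.1 hm
      subst he
      exact hc'.2 (List.mem_map_of_mem (List.mem_filter.2 ⟨hkv, by simp [h1]⟩))
    simp [h1, h2]

-- the filtered dict union of B: fresh distinct keys append
theorem pvUnion_items (flat rest : PvOut) (hrest : rest.keys.Nodup) :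
    ((rest.items.filter (fun kv => !flat.contains kv.1)).foldl
        (fun acc kv => acc.insert kv.1 kv.2) flat).items
      = flat.items ++ rest.items.filter (fun kv => !flat.contains kv.1) := by
  have := PySem.Dict.items_foldl_insert_fresh
      (l := rest.items.filter (fun kv => !flat.contains kv.1))
      (k := Prod.fst) (v := Prod.snd) (d := flat)
      (by intro a ha; simpa using (List.mem_filter.1 ha).2)
      (by
        have : rest.keys.Nodup := hrest
        simp only [PySem.Dict.keys] at this
        exact this.sublist (List.Sublist.map _ List.filter_sublist))
  simpa using this

theorem pvBMerge_cons (s : PvSource) (rest : List PvSource) :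
    pvBMerge (s :: rest)
      = (((pvBMerge rest).items.filter (fun kv => !(pvBFlatSource s).contains kv.1)).foldl
          (fun acc kv => acc.insert kv.1 kv.2) (pvBFlatSource s)) := rfl

theorem pvBMerge_keys_nodup (sources : List PvSource)
    (h : ∀ s ∈ sources, ((pvAProps s).map Prod.fst).Nodup) : (pvBMerge sources).keys.Nodup := by
  induction sources with
  | nil => exact PySem.Dict.nodup_keys_empty
  | cons s rest ih =>
    have hs := h s (List.mem_cons_self ..)
    have hr := ih (fun t ht => h t (List.mem_cons_of_mem _ ht))
    rw [pvBMerge_cons]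
    simp only [PySem.Dict.keys, pvUnion_items _ _ hr, List.map_append]
    rw [List.nodup_append]
    refine ⟨?_, ?_, ?_⟩
    · have := pvBFlatSource_keys s hs
      simp only [PySem.Dict.keys] at this
      rw [this]; exact hs
    · simp only [PySem.Dict.keys] at hr
      exact hr.sublist (List.Sublist.map _ List.filter_sublist)
    · intro a ha b hb hab
      subst hab
      obtain ⟨kv, hkv, rfl⟩ := List.mem_map.1 hb
      have h2 := (List.mem_filter.1 hkv).2
      have : (pvBFlatSource s).contains kv.1 = true := by
        rw [PySem.Dict.contains_iff_mem_keys]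
        simpa [PySem.Dict.keys] using ha
      rw [this] at h2; simp at h2

theorem pvBMerge_cons_items (s : PvSource) (rest : List PvSource)
    (hr : ∀ t ∈ rest, ((pvAProps t).map Prod.fst).Nodup) :
    (pvBMerge (s :: rest)).items
      = (pvBFlatSource s).items
        ++ (pvBMerge rest).items.filter (fun kv => !(pvBFlatSource s).contains kv.1) := by
  rw [pvBMerge_cons]
  exact pvUnion_items _ _ (pvBMerge_keys_nodup rest hr)

theorem pvBFlat_contains (s : PvSource) (hs : ((pvAProps s).map Prod.fst).Nodup) (k : String) :
    (pvBFlatSource s).contains k = decide (k ∈ (pvAProps s).map Prod.fst) := by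
  rw [PySem.Dict.contains_eq_decide_mem_keys, pvBFlatSource_keys s hs]

-- main invariant: A's accumulating fold from any dict d equals d followed by the
-- d-fresh part of B's merged result
theorem pvMainAux (sources : List PvSource)
    (h : ∀ s ∈ sources, ((pvAProps s).map Prod.fst).Nodup) (d : PvOut) (hnd : d.keys.Nodup) :
    (sources.foldl pvAStep d).items
      = d.items ++ (pvBMerge sources).items.filter (fun kv => !d.contains kv.1) := by
  induction sources generalizing d with
  | nil => simp [pvBMerge, PySem.Dict.empty]
  | cons s rest ih =>
    have hs := h s (List.mem_cons_self ..)
    have hr := fun t ht => h t (List.mem_cons_of_mem _ ht)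
    rw [List.foldl_cons, ih hr (pvAStep d s) (pvAStep_keys_nodup d s hnd hs),
        pvAStep_items d s hnd hs, pvBMerge_cons_items s rest hr, List.filter_append]
    have e1 : (pvBFlatSource s).items.filter (fun kv => !d.contains kv.1)
        = ((pvAProps s).filter (fun kv => !d.contains kv.1)).map pvF := by
      rw [pvBFlatSource_items s hs, List.filter_map]
      rfl
    have e2 : (pvBMerge rest).items.filter (fun kv => !(pvAStep d s).contains kv.1)
        = ((pvBMerge rest).items.filter (fun kv => !(pvBFlatSource s).contains kv.1)).filter
            (fun kv => !d.contains kv.1) := by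
      rw [List.filter_filter]
      apply List.filter_congr
      intro kv _
      rw [pvAStep_contains d s hnd hs, pvBFlat_contains s hs]
      cases hdc : d.contains kv.1 <;> cases hm : decide (kv.1 ∈ (pvAProps s).map Prod.fst) <;> simp
    rw [e1, e2, List.append_assoc]

-- ===== VERDICT (by name: the statement is the Claim_ definition above) =====
theorem flatten_actuator_properties_spec : Claim_equal_flatten_actuator_properties := by
  intro env _hdom hpre
  unfold Spec_flatten_actuator_properties flatten_actuator_properties flatten_actuator_properties_alt
  have hns : ∀ s ∈ ((PySem.Dict.mk env).get? "propertySources").getD [],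
      ((pvAProps s).map Prod.fst).Nodup := by
    intro s hs
    cases hsrc : (PySem.Dict.mk env).get? "propertySources" with
    | none => rw [hsrc] at hs; simp at hs
    | some v =>
      rw [hsrc] at hs; simp at hs
      have hmem : ("propertySources", v) ∈ env := PySem.Dict.mem_items_of_get?_eq_some _ hsrc
      unfold pvAProps
      cases hp : (PySem.Dict.mk s).get? "properties" with
      | none => simp
      | some w =>
        have hmem2 : ("properties", w) ∈ s := PySem.Dict.mem_items_of_get?_eq_some _ hp
        simpa using hpre _ hmem s hs _ hmem2
  rw [pvMainAux _ hns PySem.Dict.empty PySem.Dict.nodup_keys_empty]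
  simp [PySem.Dict.empty]
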